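-- pv_equiv track=rewrite | github.com/TavoStatic/nova | planner_decision.py | _last_user_question
-- ===== SOURCE A (Python) =====
-- def _last_user_question(turns: object, current_text: str = "") -> str:
--     current_low = str(current_text or "").strip().lower()
--     if not isinstance(turns, list):
--         return ""
--     for item in reversed(turns):
--         if not isinstance(item, (list, tuple)) or len(item) < 2:
--             continue
--         role = str(item[0] or "").strip().lower()
--         text = str(item[1] or "").strip()
--         if role != "user" or not text:
--             continue
--         low = text.lower()
--         if current_low and low == current_low:
--             continue
--         if "?" in text or low.startswith(("what", "how", "why", "who", "where", "when", "which")):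
--             return text
--     return ""
-- ===== SOURCE B (Python) =====
-- _QUESTION_PREFIXES = ("what", "how", "why", "who", "where", "when", "which")
--
--
-- def _last_user_question(turns: object, current_text: str = "") -> str:
--     """Staged pipeline: normalize -> keep user questions -> take the last one."""
--     if not isinstance(turns, list):
--         return ""
--     current_low = str(current_text or "").strip().lower()
--     # pass 1: normalize every well-formed turn to (role, text)
--     pairs = [
--         (str(item[0] or "").strip().lower(), str(item[1] or "").strip())
--         for item in turns
--         if isinstance(item, (list, tuple)) and len(item) >= 2
--     ]
--     # pass 2: keep only qualifying user questions
--     questions = [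
--         text
--         for role, text in pairs
--         if role == "user"
--         and text
--         and not (current_low and text.lower() == current_low)
--         and ("?" in text or any(text.lower().startswith(p) for p in _QUESTION_PREFIXES))
--     ]
--     return questions[-1] if questions else ""
-- ===== Notes on version B (the rewrite author's own statement) =====
-- stated objective: alternative
-- what changed: Replaces A's reverse scan with early return by a staged pipeline: a normalization pass building (role, text) pairs, a filtering pass keeping qualifying user questions, then taking the last element of that list.
import Mathlib
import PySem

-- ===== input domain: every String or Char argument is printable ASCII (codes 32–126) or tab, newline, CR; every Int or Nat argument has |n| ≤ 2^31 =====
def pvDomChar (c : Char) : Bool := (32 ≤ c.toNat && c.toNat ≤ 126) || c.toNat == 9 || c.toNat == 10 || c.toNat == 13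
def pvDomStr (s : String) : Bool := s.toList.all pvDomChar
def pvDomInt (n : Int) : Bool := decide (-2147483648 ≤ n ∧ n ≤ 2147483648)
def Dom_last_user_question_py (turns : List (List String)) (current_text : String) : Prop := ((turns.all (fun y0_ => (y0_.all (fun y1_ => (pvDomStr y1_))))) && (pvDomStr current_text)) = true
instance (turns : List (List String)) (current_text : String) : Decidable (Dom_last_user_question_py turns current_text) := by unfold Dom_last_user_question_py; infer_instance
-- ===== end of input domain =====

-- B replaces A's reverse scan with an early return by a staged pipeline (normalize, filter, take last) — alternative decomposition, same cost.


-- ===== PORT A =====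
-- A's loop over reversed(turns), returning at the first qualifying item.
def lastUserQGoA (current_low : String) : List (List String) → String
  | [] => ""
  | item :: rest =>
    match item with
    | role0 :: text0 :: _ =>
      let role := PySem.Str.lower (PySem.Str.strip role0)
      let text := PySem.Str.strip text0
      if role ≠ "user" ∨ text = "" then lastUserQGoA current_low rest
      else
        let low := PySem.Str.lower text
        if current_low ≠ "" ∧ low = current_low then lastUserQGoA current_low rest
        else if PySem.Str.isIn "?" text = true ∨ (PySem.Str.startswith low "what" = true ∨ PySem.Str.startswith low "how" = true ∨ PySem.Str.startswith low "why" = true ∨ PySem.Str.startswith low "who" = true ∨ PySem.Str.startswith low "where" = true ∨ PySem.Str.startswith low "when" = true ∨ PySem.Str.startswith low "which" = true) then text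
        else lastUserQGoA current_low rest
    | _ => lastUserQGoA current_low rest

def last_user_question_py (turns : List (List String)) (current_text : String) : String :=
  let current_low := PySem.Str.lower (PySem.Str.strip current_text)
  lastUserQGoA current_low turns.reverse

-- ===== PORT B =====
def pvPrefixes : List String := ["what", "how", "why", "who", "where", "when", "which"]

-- B pass 1: normalize every well-formed turn to (role, text).
def pvNormalize (turns : List (List String)) : List (String × String) :=
  turns.filterMap (fun item =>
    match item with
    | r :: t :: _ => some (PySem.Str.lower (PySem.Str.strip r), PySem.Str.strip t)
    | _ => none)

-- B pass-2 predicate: a qualifying user question.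
def pvKeep (current_low : String) (p : String × String) : Bool :=
  p.1 == "user" && !(p.2 == "") &&
  !(!(current_low == "") && (PySem.Str.lower p.2 == current_low)) &&
  (PySem.Str.isIn "?" p.2 || pvPrefixes.any (fun pre => PySem.Str.startswith (PySem.Str.lower p.2) pre))

-- B: normalize, filter, then return the last qualifying text ('questions[-1] if questions else ""').
def last_user_question_py_alt (turns : List (List String)) (current_text : String) : String :=
  let current_low := PySem.Str.lower (PySem.Str.strip current_text)
  let questions := (((pvNormalize turns).filter (pvKeep current_low)).map Prod.snd)
  questions.getLast?.getD ""

-- ===== PRECONDITION & SPEC =====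
def Spec_last_user_question_py (turns : List (List String)) (current_text : String) (out : String) : Prop := out = last_user_question_py_alt turns current_text
instance (turns : List (List String)) (current_text : String) (out : String) : Decidable (Spec_last_user_question_py turns current_text out) := by unfold Spec_last_user_question_py; infer_instance

-- ===== CLAIM =====
def Claim_equal_last_user_question_py : Prop := ∀ (turns : List (List String)) (current_text : String), Dom_last_user_question_py turns current_text → Spec_last_user_question_py turns current_text (last_user_question_py turns current_text)

-- ===== LEMMAS AND PROOFS =====
-- pvKeep unfolded into A's three propositional checks (over abstract strings).
theorem keep_iff (cl role text : String) :
    pvKeep cl (role, text) = true ↔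
      (role = "user" ∧ text ≠ "") ∧
      ¬(cl ≠ "" ∧ PySem.Str.lower text = cl) ∧
      (PySem.Str.isIn "?" text = true ∨ (PySem.Str.startswith (PySem.Str.lower text) "what" = true ∨ PySem.Str.startswith (PySem.Str.lower text) "how" = true ∨ PySem.Str.startswith (PySem.Str.lower text) "why" = true ∨ PySem.Str.startswith (PySem.Str.lower text) "who" = true ∨ PySem.Str.startswith (PySem.Str.lower text) "where" = true ∨ PySem.Str.startswith (PySem.Str.lower text) "when" = true ∨ PySem.Str.startswith (PySem.Str.lower text) "which" = true)) := by
  simp only [pvKeep, pvPrefixes, Bool.and_eq_true, List.any_cons, List.any_nil,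
    Bool.or_eq_true, Bool.or_false, beq_iff_eq, Bool.not_eq_true', Bool.and_eq_false_iff,
    Bool.not_eq_false', beq_eq_false_iff_ne]
  constructor
  · rintro ⟨⟨⟨h1, h2⟩, h3⟩, h4⟩
    refine ⟨⟨h1, h2⟩, ?_, h4⟩
    rintro ⟨hc, hl⟩
    rcases h3 with h | h
    · exact hc h
    · exact h hl
  · rintro ⟨⟨h1, h2⟩, h3, h4⟩
    refine ⟨⟨⟨h1, h2⟩, ?_⟩, h4⟩
    by_cases hc : cl = ""
    · exact Or.inl hc
    · right; intro hl; exact h3 ⟨hc, hl⟩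

-- A's scan returns the head of B's pipeline applied to the scanned list.
theorem goA_eq_pipeline_head (cl : String) (l : List (List String)) :
    lastUserQGoA cl l = ((((pvNormalize l).filter (pvKeep cl)).map Prod.snd).head?).getD "" := by
  induction l with
  | nil => rfl
  | cons item rest ih =>
    cases item with
    | nil => simpa [lastUserQGoA, pvNormalize] using ih
    | cons r t =>
      cases t with
      | nil => simpa [lastUserQGoA, pvNormalize] using ih
      | cons x xs =>
        simp only [lastUserQGoA, pvNormalize, List.filterMap_cons, List.filter_cons] at *
        generalize PySem.Str.lower (PySem.Str.strip r) = role
        generalize PySem.Str.strip x = text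
        have hk := keep_iff cl role text
        by_cases hkeep : pvKeep cl (role, text) = true
        · rw [hk] at hkeep
          obtain ⟨⟨h1, h2⟩, h3, h4⟩ := hkeep
          rw [if_neg (by push Not; exact ⟨h1, h2⟩), if_neg h3, if_pos h4]
          rw [if_pos (hk.mpr ⟨⟨h1, h2⟩, h3, h4⟩)]
          simp
        · rw [if_neg hkeep]
          rw [hk] at hkeep
          split_ifs with h1 h2 h3
          · exact ih
          · exact ih
          · exact absurd ⟨by push Not at h1; exact ⟨h1.1, h1.2⟩, h2, h3⟩ hkeep
          · exact ih

-- ===== VERDICT =====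
theorem last_user_question_py_spec : Claim_equal_last_user_question_py := by
  intro turns current_text _
  unfold Spec_last_user_question_py last_user_question_py last_user_question_py_alt
  rw [goA_eq_pipeline_head]
  simp [pvNormalize, List.filterMap_reverse, List.filter_reverse, List.map_reverse,
    List.head?_reverse]
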